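-- pv_equiv track=rewrite | github.com/chanyoonzhu/leetcode-python | 1371-Find_the_Longest_Substring_Containing_Vowels_in_Even_Counts.py | findTheLongestSubstring
-- ===== SOURCE A (Python) =====
-- def findTheLongestSubstring(s: str) -> int:
--     vowels = {'a': 1, 'e': 2, 'i': 4, 'o': 8, 'u': 16}
--     result = 0
--     n = 0
--     states = {0: -1}
--     for i, c in enumerate(s):
--         if c in vowels:
--             n ^= vowels[c]
--         if n not in states:
--             states[n] = i
--         else:
--             result = max(result, i - states[n])
--     return result
-- ===== SOURCE B (Python) =====
-- def findTheLongestSubstring(s: str) -> int: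
--     masks = {'a': 1, 'e': 2, 'i': 4, 'o': 8, 'u': 16}
--     m = 0
--     pre = [0]
--     for c in s:
--         m ^= masks.get(c, 0)
--         pre.append(m)
--     best = 0
--     for a in range(len(pre)):
--         for b in range(a + 1, len(pre)):
--             if pre[a] == pre[b]:
--                 best = max(best, b - a)
--     return best
-- ===== Notes on version B (the rewrite author's own statement) =====
-- stated objective: alternative
-- what changed: replaces the dict that maps each prefix vowel-parity state to its first index by an explicit prefix-parity array followed by a brute-force scan over all index pairs with equal parity
import Mathlib
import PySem

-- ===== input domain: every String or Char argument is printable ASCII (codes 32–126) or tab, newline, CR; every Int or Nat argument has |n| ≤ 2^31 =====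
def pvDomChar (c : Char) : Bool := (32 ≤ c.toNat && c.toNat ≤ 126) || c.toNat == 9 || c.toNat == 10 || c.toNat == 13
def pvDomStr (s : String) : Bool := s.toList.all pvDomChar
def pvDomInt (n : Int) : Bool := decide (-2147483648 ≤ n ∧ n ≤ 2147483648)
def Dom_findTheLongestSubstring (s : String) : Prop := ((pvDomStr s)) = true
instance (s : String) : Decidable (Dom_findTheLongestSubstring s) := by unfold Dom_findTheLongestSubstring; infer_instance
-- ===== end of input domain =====

-- B replaces A's first-occurrence dict of prefix parity states by an explicit prefix-parity
-- array and a brute-force scan over all index pairs with equal parity (alternative, not faster).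

-- ===== PORT A =====
def findTheLongestSubstring (s : String) : Int :=
  let vowels : PySem.Dict Char Int := PySem.Dict.ofList [('a', 1), ('e', 2), ('i', 4), ('o', 8), ('u', 16)]
  let fin := (PySem.List.enumerate s.toList 0).foldl
    (fun (st : Int × Int × PySem.Dict Int Int) (ic : Int × Char) =>
      let r := st.1
      let n := if vowels.contains ic.2 then PySem.Int.bxor st.2.1 (vowels.getD ic.2 0) else st.2.1
      let states := st.2.2
      if states.contains n = false then (r, n, states.insert n ic.1)
      else (max r (ic.1 - states.getD n 0), n, states))
    (0, 0, PySem.Dict.ofList [((0 : Int), (-1 : Int))])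
  fin.1

-- ===== PORT B =====
def findTheLongestSubstring_alt (s : String) : Int :=
  let masks : PySem.Dict Char Int := PySem.Dict.ofList [('a', 1), ('e', 2), ('i', 4), ('o', 8), ('u', 16)]
  let mp := s.toList.foldl
    (fun (st : Int × List Int) c =>
      let m := PySem.Int.bxor st.1 (masks.getD c 0)
      (m, st.2 ++ [m]))
    (0, [0])
  let pre := mp.2
  let L : Int := pre.length
  (PySem.List.pyRange 0 L 1).foldl
    (fun best a =>
      (PySem.List.pyRange (a + 1) L 1).foldl
        (fun best b =>
          if PySem.List.pyGetD pre a 0 = PySem.List.pyGetD pre b 0 then max best (b - a) else best)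
        best)
    0

-- ===== PRECONDITION & SPEC =====
def Spec_findTheLongestSubstring (s : String) (out : Int) : Prop := out = findTheLongestSubstring_alt s
instance (s : String) (out : Int) : Decidable (Spec_findTheLongestSubstring s out) := by unfold Spec_findTheLongestSubstring; infer_instance

-- ===== CLAIM (what is proved, stated in full; the proofs are below) =====
def Claim_equal_findTheLongestSubstring : Prop := ∀ (s : String), Dom_findTheLongestSubstring s → Spec_findTheLongestSubstring s (findTheLongestSubstring s)

-- ===== LEMMAS AND PROOFS =====

-- the vowel bitmask of a character (0 for a non-vowel)
def pmask (c : Char) : Int :=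
  if c = 'a' then 1 else if c = 'e' then 2 else if c = 'i' then 4
  else if c = 'o' then 8 else if c = 'u' then 16 else 0

-- the list of prefix parity states starting from state m (length = chars + 1)
def prefs : Int → List Char → List Int
  | m, [] => [m]
  | m, c :: cs => m :: prefs (PySem.Int.bxor m (pmask c)) cs

-- index of the first occurrence of x
def fidx (x : Int) : List Int → Nat
  | [] => 0
  | y :: t => if y = x then 0 else fidx x t + 1

-- A's best value over the first j prefix positions
def gain (ps : List Int) (b : Nat) : Int := (b : Int) - (fidx (ps.getD b 0) ps : Int)

def RA (ps : List Int) (j : Nat) : Int := (List.range j).foldl (fun acc b => max acc (gain ps b)) 0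

theorem fidx_le (ps : List Int) : ∀ (a : Nat), a < ps.length → fidx (ps.getD a 0) ps ≤ a := by
  induction ps with
  | nil => intro a h; simp at h
  | cons y t ih =>
    intro a h
    cases a with
    | zero => simp [fidx]
    | succ a =>
      simp only [List.getD_cons_succ, fidx]
      split
      · omega
      · have := ih a (by simpa using h); omega

theorem fidx_getD (ps : List Int) (x : Int) (hx : x ∈ ps) : ps.getD (fidx x ps) 0 = x := by
  induction ps with
  | nil => simp at hx
  | cons y t ih =>
    by_cases h : y = x
    · simp [fidx, h]
    · have hxt : x ∈ t := by
        rcases List.mem_cons.mp hx with rfl | h'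
        · exact absurd rfl h
        · exact h'
      simp only [fidx, if_neg h, List.getD_cons_succ]
      exact ih hxt

theorem fidx_eq_of_not_mem_take (ps : List Int) : ∀ (b : Nat), b < ps.length →
    ps.getD b 0 ∉ ps.take b → fidx (ps.getD b 0) ps = b := by
  induction ps with
  | nil => intro b h; simp at h
  | cons y t ih =>
    intro b hb hmem
    cases b with
    | zero => simp [fidx]
    | succ b =>
      simp only [List.getD_cons_succ, fidx]
      have hy : y ≠ t.getD b 0 := by
        intro h
        exact hmem (by rw [List.getD_cons_succ, List.take_succ_cons, h]; exact List.mem_cons_self ..)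
      rw [if_neg hy]
      have : fidx (t.getD b 0) t = b := by
        apply ih b (by simpa using hb)
        intro h
        exact hmem (by rw [List.getD_cons_succ, List.take_succ_cons]; exact List.mem_cons_of_mem _ h)
      omega

theorem RA_nonneg (ps : List Int) (j : Nat) : 0 ≤ RA ps j :=
  (PySem.List.le_foldl_max_int (List.range j) (gain ps) 0).1

theorem gain_le_RA (ps : List Int) (j b : Nat) (hb : b < j) : gain ps b ≤ RA ps j :=
  (PySem.List.le_foldl_max_int (List.range j) (gain ps) 0).2 b (List.mem_range.mpr hb)

theorem RA_succ (ps : List Int) (j : Nat) : RA ps (j + 1) = max (RA ps j) (gain ps j) := by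
  simp [RA, List.range_succ]

-- prefix-state facts
theorem prefs_length (m : Int) (l : List Char) : (prefs m l).length = l.length + 1 := by
  induction l generalizing m with
  | nil => simp [prefs]
  | cons c cs ih => simp [prefs, ih]

-- upper bound for a running max over a projection
theorem foldl_max_le_int {α : Type} (xs : List α) (f : α → Int) (init c : Int)
    (h0 : init ≤ c) (h : ∀ x ∈ xs, f x ≤ c) :
    xs.foldl (fun acc y => max acc (f y)) init ≤ c := by
  induction xs generalizing init with
  | nil => simpa using h0
  | cons x t ih =>
    simp only [List.foldl_cons]
    exact ih _ (max_le h0 (h x (List.mem_cons_self ..))) (fun y hy => h y (List.mem_cons_of_mem _ hy))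

-- vowel lookup lemmas
theorem masks_getD (c : Char) :
    (PySem.Dict.ofList [('a', (1:Int)), ('e', 2), ('i', 4), ('o', 8), ('u', 16)]).getD c 0 = pmask c := by
  simp only [show PySem.Dict.ofList [('a', (1:Int)), ('e', 2), ('i', 4), ('o', 8), ('u', 16)] = PySem.Dict.mk [('a', (1:Int)), ('e', 2), ('i', 4), ('o', 8), ('u', 16)] from by decide]
  simp [PySem.Dict.getD_eq_get?_getD, PySem.Dict.get?_mk_cons, pmask]
  split_ifs <;> simp_all [eq_comm] <;> rfl

theorem vowels_step (n : Int) (c : Char) :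
    (if (PySem.Dict.ofList [('a', (1:Int)), ('e', 2), ('i', 4), ('o', 8), ('u', 16)]).contains c then
      PySem.Int.bxor n ((PySem.Dict.ofList [('a', (1:Int)), ('e', 2), ('i', 4), ('o', 8), ('u', 16)]).getD c 0)
    else n) = PySem.Int.bxor n (pmask c) := by
  by_cases h : (PySem.Dict.ofList [('a', (1:Int)), ('e', 2), ('i', 4), ('o', 8), ('u', 16)]).contains c = true
  · rw [if_pos h, masks_getD]
  · rw [if_neg h]
    have h0 : pmask c = 0 := by
      unfold pmask
      split_ifs with h1 h2 h3 h4 h5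
      · exact absurd (by subst h1; decide) h
      · exact absurd (by subst h2; decide) h
      · exact absurd (by subst h3; decide) h
      · exact absurd (by subst h4; decide) h
      · exact absurd (by subst h5; decide) h
      · rfl
    rw [h0, PySem.Int.bxor_zero]

theorem prefs_head_tail_aux (m : Int) (l : List Char) : m :: (prefs m l).tail = prefs m l := by
  cases l <;> simp [prefs]

-- A's loop step, with the vowel-table lookup replaced by pmask (extensionally equal, vowels_step)
def stepA (st : Int × Int × PySem.Dict Int Int) (ic : Int × Char) : Int × Int × PySem.Dict Int Int :=
  let n := PySem.Int.bxor st.2.1 (pmask ic.2)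
  if st.2.2.contains n = false then (st.1, n, st.2.2.insert n ic.1)
  else (max st.1 (ic.1 - st.2.2.getD n 0), n, st.2.2)

-- A's loop invariant
theorem A_loop (ps : List Int) :
    ∀ (l2 : List Char) (k : Nat) (r : Int) (d : PySem.Dict Int Int),
    k + l2.length + 1 = ps.length →
    ps.drop k = prefs (ps.getD k 0) l2 →
    (∀ m, d.get? m = if m ∈ ps.take (k + 1) then some ((fidx m ps : Int) - 1) else none) →
    r = RA ps (k + 1) →
    ((PySem.List.enumerate l2 (k : Int)).foldl stepA (r, ps.getD k 0, d)).1 = RA ps ps.length := by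
  intro l2
  induction l2 with
  | nil =>
    intro k r d hlen hdrop hd hr
    have hk : k + 1 = ps.length := by simpa using hlen
    rw [PySem.List.enumerate_nil, List.foldl_nil]
    simpa [hk] using hr
  | cons c cs ih =>
    intro k r d hlen hdrop hd hr
    have hdropk : ps.drop k = ps.getD k 0 :: prefs (PySem.Int.bxor (ps.getD k 0) (pmask c)) cs := by
      rw [hdrop]; rfl
    have hdrop1 : ps.drop (k + 1) = prefs (PySem.Int.bxor (ps.getD k 0) (pmask c)) cs := by
      have h := congrArg List.tail hdropk
      rwa [List.tail_drop] at h
    have hk1len : k + 1 < ps.length := by simp at hlen; omega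
    have hget1 : ps.getD (k + 1) 0 = PySem.Int.bxor (ps.getD k 0) (pmask c) := by
      have h1 : (ps.drop (k+1))[0]? = some (PySem.Int.bxor (ps.getD k 0) (pmask c)) := by
        rw [hdrop1, ← prefs_head_tail_aux]; rfl
      rw [List.getElem?_drop] at h1
      rw [List.getD_eq_getElem?_getD]
      simpa using congrArg (Option.getD · 0) h1
    have htake2 : ps.take (k + 2) = ps.take (k + 1) ++ [PySem.Int.bxor (ps.getD k 0) (pmask c)] := by
      rw [List.take_add_one]
      congr 1
      rw [List.getElem?_eq_getElem hk1len]
      have h2 := hget1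
      rw [List.getD_eq_getElem?_getD, List.getElem?_eq_getElem hk1len] at h2
      simp at h2
      simp [h2]
    have hcast : (k : Int) + 1 = ((k + 1 : Nat) : Int) := by push_cast; ring
    rw [PySem.List.enumerate_cons, List.foldl_cons]
    by_cases hmem : PySem.Int.bxor (ps.getD k 0) (pmask c) ∈ ps.take (k + 1)
    · -- the new state was seen before: result is updated, dict unchanged
      have hcont : d.contains (PySem.Int.bxor (ps.getD k 0) (pmask c)) = true := by
        rw [PySem.Dict.contains_eq_isSome_get?, hd, if_pos hmem]; rfl
      have hgetD : d.getD (PySem.Int.bxor (ps.getD k 0) (pmask c)) 0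
          = (fidx (PySem.Int.bxor (ps.getD k 0) (pmask c)) ps : Int) - 1 := by
        rw [PySem.Dict.getD_eq_get?_getD, hd, if_pos hmem]; rfl
      have hs : stepA (r, ps.getD k 0, d) ((k : Int), c)
          = (max r ((k : Int) - ((fidx (PySem.Int.bxor (ps.getD k 0) (pmask c)) ps : Int) - 1)),
             ps.getD (k + 1) 0, d) := by
        simp only [stepA]
        rw [← hget1] at hcont hgetD ⊢
        rw [if_neg (show ¬ (d.contains (ps.getD (k+1) 0) = false) from by rw [hcont]; decide), hgetD]
      rw [hs, hcast]
      refine ih (k + 1) _ d ?_ ?_ ?_ ?_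
      · simp at hlen ⊢; omega
      · rw [hget1]; exact hdrop1
      · intro mm
        rw [hd mm, htake2]
        by_cases hmm : mm ∈ ps.take (k + 1)
        · rw [if_pos hmm, if_pos (List.mem_append_left _ hmm)]
        · rw [if_neg hmm, if_neg]
          intro hin
          rcases List.mem_append.mp hin with h | h
          · exact hmm h
          · simp at h
            exact hmm (h ▸ hmem)
      · rw [RA_succ ps (k+1)]
        unfold gain
        rw [hget1]
        exact congrArg₂ max hr (by push_cast; ring)
    · -- a fresh state: it is recorded with index k, result unchanged
      have hcont : d.contains (PySem.Int.bxor (ps.getD k 0) (pmask c)) = false := by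
        rw [PySem.Dict.contains_eq_isSome_get?, hd, if_neg hmem]; rfl
      have hfidx : fidx (PySem.Int.bxor (ps.getD k 0) (pmask c)) ps = k + 1 := by
        rw [← hget1]
        exact fidx_eq_of_not_mem_take ps (k+1) hk1len (by rwa [hget1])
      have hs : stepA (r, ps.getD k 0, d) ((k : Int), c)
          = (r, ps.getD (k + 1) 0, d.insert (PySem.Int.bxor (ps.getD k 0) (pmask c)) (k : Int)) := by
        simp only [stepA]
        rw [← hget1] at hcont ⊢
        rw [if_pos hcont]
      rw [hs, hcast]
      refine ih (k + 1) r _ ?_ ?_ ?_ ?_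
      · simp at hlen ⊢; omega
      · rw [hget1]; exact hdrop1
      · intro mm
        rw [PySem.Dict.get?_insert, htake2]
        by_cases hmm : mm = PySem.Int.bxor (ps.getD k 0) (pmask c)
        · rw [if_pos hmm, if_pos (by rw [hmm]; exact List.mem_append_right _ (by simp)), hmm, hfidx]
          congr 1
          push_cast; ring
        · rw [if_neg hmm, hd mm]
          by_cases hmm' : mm ∈ ps.take (k + 1)
          · rw [if_pos hmm', if_pos (List.mem_append_left _ hmm')]
          · rw [if_neg hmm', if_neg]
            intro hin
            rcases List.mem_append.mp hin with h | h
            · exact hmm' h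
            · exact hmm (by simpa using h)
      · rw [hr, RA_succ ps (k+1)]
        have hg : gain ps (k + 1) = 0 := by
          unfold gain
          rw [hget1, hfidx]
          simp
        rw [hg]
        exact (max_eq_left (RA_nonneg ps (k+1))).symm

-- A computes RA
theorem A_eq_RA (s : String) :
    findTheLongestSubstring s = RA (prefs 0 s.toList) (prefs 0 s.toList).length := by
  have hfun : (fun (st : Int × Int × PySem.Dict Int Int) (ic : Int × Char) =>
      let r := st.1
      let n := if (PySem.Dict.ofList [('a', (1:Int)), ('e', 2), ('i', 4), ('o', 8), ('u', 16)]).contains ic.2 then PySem.Int.bxor st.2.1 ((PySem.Dict.ofList [('a', (1:Int)), ('e', 2), ('i', 4), ('o', 8), ('u', 16)]).getD ic.2 0) else st.2.1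
      let states := st.2.2
      if states.contains n = false then (r, n, states.insert n ic.1)
      else (max r (ic.1 - states.getD n 0), n, states)) = stepA := by
    funext st ic
    show (if (st.2.2).contains (if _ then _ else _) = false then _ else _) = _
    rw [vowels_step]
    rfl
  show (List.foldl (fun (st : Int × Int × PySem.Dict Int Int) (ic : Int × Char) =>
      let r := st.1
      let n := if (PySem.Dict.ofList [('a', (1:Int)), ('e', 2), ('i', 4), ('o', 8), ('u', 16)]).contains ic.2 then PySem.Int.bxor st.2.1 ((PySem.Dict.ofList [('a', (1:Int)), ('e', 2), ('i', 4), ('o', 8), ('u', 16)]).getD ic.2 0) else st.2.1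
      let states := st.2.2
      if states.contains n = false then (r, n, states.insert n ic.1)
      else (max r (ic.1 - states.getD n 0), n, states))
      (0, 0, PySem.Dict.ofList [((0 : Int), (-1 : Int))]) (PySem.List.enumerate s.toList 0)).1
    = RA (prefs 0 s.toList) (prefs 0 s.toList).length
  rw [hfun]
  have h0 : (prefs 0 s.toList).getD 0 0 = 0 := by
    rw [← prefs_head_tail_aux]; rfl
  have hd0 : ∀ m, (PySem.Dict.ofList [((0 : Int), (-1 : Int))]).get? m
      = if m ∈ (prefs 0 s.toList).take (0 + 1) then some ((fidx m (prefs 0 s.toList) : Int) - 1) else none := by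
    intro m
    have ht1 : (prefs 0 s.toList).take 1 = [0] := by
      rw [← prefs_head_tail_aux]; rfl
    rw [ht1]
    by_cases hm : m = 0
    · subst hm
      have hf : fidx 0 (prefs 0 s.toList) = 0 := by rw [← prefs_head_tail_aux]; simp [fidx]
      rw [hf]
      simp
      rfl
    · rw [show PySem.Dict.ofList [((0:Int), (-1:Int))] = PySem.Dict.mk [((0:Int), (-1:Int))] from by decide, PySem.Dict.get?_mk_cons]
      simp [hm, Ne.symm hm]
      rfl
  have hthis := A_loop (prefs 0 s.toList) s.toList 0 0 (PySem.Dict.ofList [((0 : Int), (-1 : Int))])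
    (by simp [prefs_length]) (by rw [h0]; simp) hd0 (by simp [RA, gain, List.range_succ])
  rw [h0] at hthis
  exact hthis

-- B's prefix building loop computes prefs
theorem B_pre (l : List Char) :
    ∀ (m : Int) (P : List Int),
    (l.foldl (fun (st : Int × List Int) c =>
        let m := PySem.Int.bxor st.1 ((PySem.Dict.ofList [('a', (1:Int)), ('e', 2), ('i', 4), ('o', 8), ('u', 16)]).getD c 0)
        (m, st.2 ++ [m])) (m, P)).2 = P ++ (prefs m l).tail := by
  induction l with
  | nil => intro m P; simp [prefs]
  | cons c cs ih =>
    intro m P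
    rw [List.foldl_cons]
    refine (ih _ _).trans ?_
    rw [masks_getD]
    simp [prefs, prefs_head_tail_aux]

-- the value of B's double loop
def VB (ps : List Int) : Int :=
  (PySem.List.pyRange 0 (ps.length : Int) 1).foldl
    (fun best a =>
      (PySem.List.pyRange (a + 1) (ps.length : Int) 1).foldl
        (fun best b =>
          if PySem.List.pyGetD ps a 0 = PySem.List.pyGetD ps b 0 then max best (b - a) else best)
        best)
    0

theorem B_eq_VB (s : String) : findTheLongestSubstring_alt s = VB (prefs 0 s.toList) := by
  have hpre : (s.toList.foldl (fun (st : Int × List Int) c =>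
      let m := PySem.Int.bxor st.1 ((PySem.Dict.ofList [('a', (1:Int)), ('e', 2), ('i', 4), ('o', 8), ('u', 16)]).getD c 0)
      (m, st.2 ++ [m])) (0, [0])).2 = prefs 0 s.toList := by
    rw [B_pre]
    show 0 :: (prefs 0 s.toList).tail = _
    exact prefs_head_tail_aux 0 s.toList
  simp only [findTheLongestSubstring_alt, VB]
  rw [hpre]

-- the inner loop of B, over the filtered list of matching partners
def Lfilt (ps : List Int) (a : Int) : List Int :=
  (PySem.List.pyRange (a + 1) (ps.length : Int) 1).filter
    (fun b => decide (PySem.List.pyGetD ps a 0 = PySem.List.pyGetD ps b 0))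

theorem innerB_eq (ps : List Int) (a best : Int) :
    (PySem.List.pyRange (a + 1) (ps.length : Int) 1).foldl
      (fun best b => if PySem.List.pyGetD ps a 0 = PySem.List.pyGetD ps b 0 then max best (b - a) else best) best
    = (Lfilt ps a).foldl (fun acc b => max acc (b - a)) best := by
  rw [PySem.List.foldl_ite_eq_foldl_filter]
  rfl

-- the outer loop only increases its accumulator
theorem outer_mono (ps : List Int) (l : List Int) :
    ∀ init : Int, init ≤ l.foldl (fun best a => (Lfilt ps a).foldl (fun acc b => max acc (b - a)) best) init := by
  induction l with
  | nil => intro init; simp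
  | cons x t ih =>
    intro init
    refine le_trans ?_ (ih _)
    exact (PySem.List.le_foldl_max_int (Lfilt ps x) (fun b => b - x) init).1

theorem outer_le (ps : List Int) (l : List Int) (c : Int)
    (h : ∀ a ∈ l, ∀ b ∈ Lfilt ps a, b - a ≤ c) :
    ∀ init : Int, init ≤ c → l.foldl (fun best a => (Lfilt ps a).foldl (fun acc b => max acc (b - a)) best) init ≤ c := by
  induction l with
  | nil => intro init h0; simpa using h0
  | cons x t ih =>
    intro init h0
    refine ih (fun a ha b hb => h a (List.mem_cons_of_mem _ ha) b hb) _ ?_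
    exact foldl_max_le_int (Lfilt ps x) (fun b => b - x) init c h0 (h x (List.mem_cons_self ..))

theorem pair_le_outer (ps : List Int) (l : List Int) (a b : Int)
    (ha : a ∈ l) (hb : b ∈ Lfilt ps a) :
    ∀ init : Int, b - a ≤ l.foldl (fun best a => (Lfilt ps a).foldl (fun acc b => max acc (b - a)) best) init := by
  induction l with
  | nil => simp at ha
  | cons x t ih =>
    intro init
    rcases List.mem_cons.mp ha with rfl | ha'
    · refine le_trans ((PySem.List.le_foldl_max_int (Lfilt ps a) (fun b => b - a) init).2 b hb) ?_
      exact outer_mono ps t _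
    · exact ih ha' _

theorem VB_eq_outer (ps : List Int) :
    VB ps = (PySem.List.pyRange 0 (ps.length : Int) 1).foldl
      (fun best a => (Lfilt ps a).foldl (fun acc b => max acc (b - a)) best) 0 := by
  unfold VB
  apply PySem.List.foldl_congr_mem
  intro acc a _
  exact innerB_eq ps a acc

theorem VA_eq_VB (ps : List Int) : RA ps ps.length = VB ps := by
  rw [VB_eq_outer]
  have hmemps : ∀ b : Nat, b < ps.length → ps.getD b 0 ∈ ps := by
    intro b hb
    rw [List.getD_eq_getElem _ _ hb]
    exact List.getElem_mem hb
  apply le_antisymm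
  · -- every gain is realised by a pair (or is 0)
    apply foldl_max_le_int _ _ _ _ (outer_mono ps _ 0)
    intro b hb
    rw [List.mem_range] at hb
    have hf_le : fidx (ps.getD b 0) ps ≤ b := fidx_le ps b hb
    by_cases hfb : fidx (ps.getD b 0) ps = b
    · have : gain ps b = 0 := by unfold gain; rw [hfb]; ring
      rw [this]
      exact outer_mono ps _ 0
    · have hflt : fidx (ps.getD b 0) ps < b := lt_of_le_of_ne hf_le hfb
      have hga : gain ps b = (b : Int) - ((fidx (ps.getD b 0) ps : Nat) : Int) := rfl
      rw [hga]
      apply pair_le_outer ps _ _ _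
      · rw [PySem.List.mem_pyRange_one]
        constructor
        · positivity
        · exact_mod_cast lt_of_lt_of_le hflt (le_of_lt hb)
      · rw [Lfilt, List.mem_filter]
        constructor
        · rw [PySem.List.mem_pyRange_one]
          constructor
          · exact_mod_cast hflt
          · exact_mod_cast hb
        · simp only [PySem.List.pyGetD_natCast, decide_eq_true_eq]
          rw [fidx_getD ps _ (hmemps b hb)]
  · -- every pair's length is at most some gain
    apply outer_le
    · intro a ha b hb
      rw [PySem.List.mem_pyRange_one] at ha
      rw [Lfilt, List.mem_filter, PySem.List.mem_pyRange_one] at hb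
      obtain ⟨⟨hab, hbL⟩, heq⟩ := hb
      have ha0 : 0 ≤ a := ha.1
      have hb0 : 0 ≤ b := by omega
      have hbN : b.toNat < ps.length := by omega
      have haN : a.toNat < ps.length := by omega
      have hcastb : ((b.toNat : Nat) : Int) = b := Int.toNat_of_nonneg hb0
      have hcasta : ((a.toNat : Nat) : Int) = a := Int.toNat_of_nonneg ha0
      have heq' : ps.getD a.toNat 0 = ps.getD b.toNat 0 := by
        have h1 : PySem.List.pyGetD ps ((a.toNat : Nat) : Int) 0 = PySem.List.pyGetD ps ((b.toNat : Nat) : Int) 0 := by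
          rw [hcasta, hcastb]
          simpa using heq
        simpa only [PySem.List.pyGetD_natCast] using h1
      have hfle : fidx (ps.getD b.toNat 0) ps ≤ a.toNat := by
        rw [← heq']
        exact fidx_le ps a.toNat haN
      have : b - a ≤ gain ps b.toNat := by
        unfold gain
        omega
      exact le_trans this (gain_le_RA ps ps.length b.toNat hbN)
    · exact RA_nonneg ps ps.length

-- ===== VERDICT (by name: the statement is the Claim_ definition above) =====
theorem findTheLongestSubstring_spec : Claim_equal_findTheLongestSubstring := by
  intro s _
  unfold Spec_findTheLongestSubstring
  rw [A_eq_RA, B_eq_VB, VA_eq_VB]
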